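-- pv_equiv track=rewrite | github.com/stemado/ok_vote | Services/Files/file_writer.py | split_text_by_all_caps_lines
-- ===== SOURCE A (Python) =====
-- def split_text_by_all_caps_lines(text):
--     # Split text by lines
--     lines = text.split('\n')
--
--     # Initialize a list to hold chunks of text
--     chunks = []
--     # Initialize a temporary string to hold the current chunk of text
--     chunk = ""
--
--     for line in lines:
--         # If the line contains only capital letters (and possibly spaces)
--         if line.isupper():
--             # Add the current chunk to the chunks list
--             chunks.append(chunk.strip())
--             # Start new chunk with the all-caps line
--             chunk = line + "\n"
--         else:
--             # Add the line to the chunk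
--             chunk += line + "\n"
--
--     # Don't forget to add the last chunk
--     chunks.append(chunk.strip())
--
--     return [c for c in chunks if c]
-- ===== SOURCE B (Python) =====
-- def split_text_by_all_caps_lines(text):
--     lines = text.split('\n')
--     # boundaries: indices of all-caps lines
--     boundaries = [i for i, l in enumerate(lines) if l.isupper()]
--     segments = []
--     start = 0
--     for b in boundaries:
--         segments.append(lines[start:b])
--         start = b
--     segments.append(lines[start:])
--     result = []
--     for seg in segments:
--         c = '\n'.join(seg).strip()
--         if c:
--             result.append(c)
--     return result
-- ===== Notes on version B (the rewrite author's own statement) =====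
-- stated objective: alternative
-- what changed: B replaces A's single accumulating pass (growing a string chunk line by line) with a two-phase index computation: it first collects the indices of all-caps boundary lines via enumerate, then slices the line list between consecutive boundaries and joins/strips each segment.
import Mathlib
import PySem

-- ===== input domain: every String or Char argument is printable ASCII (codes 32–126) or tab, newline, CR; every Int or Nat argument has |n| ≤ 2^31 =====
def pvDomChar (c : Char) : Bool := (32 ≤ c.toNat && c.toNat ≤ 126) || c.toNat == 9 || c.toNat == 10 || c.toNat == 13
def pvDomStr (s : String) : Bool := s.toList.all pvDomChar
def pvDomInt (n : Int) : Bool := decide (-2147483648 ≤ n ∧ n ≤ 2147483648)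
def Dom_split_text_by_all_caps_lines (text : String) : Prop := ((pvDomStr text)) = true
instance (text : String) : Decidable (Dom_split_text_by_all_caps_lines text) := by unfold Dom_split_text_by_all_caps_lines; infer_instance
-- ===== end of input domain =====

-- B computes the same chunks by a two-phase boundary-index/slice decomposition instead of A's single accumulating pass (objective: alternative).

-- ===== PORT A =====
-- line.isupper() on the ASCII domain: at least one cased char, and no lowercase char
def pyStrIsupper (cs : List Char) : Bool :=
  cs.any (fun c => PySem.Chars.islower c || PySem.Chars.isupper c) &&
  cs.all (fun c => !PySem.Chars.islower c)

-- A's loop: state = (chunks, current chunk); after the loop the last chunk is appended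
def pvLoopA : List (List Char) → List (List Char) → List Char → List (List Char)
  | [], chunks, chunk => chunks ++ [PySem.Chars.strip chunk]
  | l :: ls, chunks, chunk =>
      if pyStrIsupper l then
        pvLoopA ls (chunks ++ [PySem.Chars.strip chunk]) (l ++ ['\n'])
      else
        pvLoopA ls chunks (chunk ++ (l ++ ['\n']))

def split_text_by_all_caps_lines (text : String) : List String :=
  let lines := ((PySem.Str.split? text "\n").getD []).map String.toList
  ((pvLoopA lines [] []).filter (fun c => !c.isEmpty)).map String.mk

-- ===== PORT B =====
def split_text_by_all_caps_lines_alt (text : String) : List String :=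
  let lines := ((PySem.Str.split? text "\n").getD []).map String.toList
  let boundaries := ((PySem.List.enumerate lines).filter (fun p => pyStrIsupper p.2)).map (·.1)
  let st := boundaries.foldl
    (fun (st : List (List (List Char)) × Int) b =>
      (st.1 ++ [PySem.List.slice lines (some st.2) (some b)], b)) ([], 0)
  let segments := st.1 ++ [PySem.List.slice lines (some st.2)]
  (segments.foldl (fun res seg =>
      let c := PySem.Chars.strip (PySem.Chars.join ['\n'] seg)
      if !c.isEmpty then res ++ [c] else res) []).map String.mk

-- ===== PRECONDITION & SPEC =====
def Spec_split_text_by_all_caps_lines (text : String) (out : List String) : Prop := out = split_text_by_all_caps_lines_alt text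
instance (text : String) (out : List String) : Decidable (Spec_split_text_by_all_caps_lines text out) := by unfold Spec_split_text_by_all_caps_lines; infer_instance

-- ===== CLAIM (what is proved, stated in full; the proofs are below) =====
def Claim_equal_split_text_by_all_caps_lines : Prop := ∀ (text : String), Dom_split_text_by_all_caps_lines text → Spec_split_text_by_all_caps_lines text (split_text_by_all_caps_lines text)

-- ===== LEMMAS AND PROOFS =====

-- the common segment structure: the segments after the leading one, each headed by a boundary line
def pvSegsB : List (List Char) → List (List (List Char))
  | [] => []
  | b :: ls =>
      (b :: ls.takeWhile (fun l => !pyStrIsupper l)) :: pvSegsB (ls.dropWhile (fun l => !pyStrIsupper l))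
  termination_by ls => ls.length
  decreasing_by
    simp only [List.length_cons]
    exact Nat.lt_succ_of_le (List.length_dropWhile_le _ _)

lemma pvSegsB_cons (b : List Char) (ls : List (List Char)) :
    pvSegsB (b :: ls) =
      (b :: ls.takeWhile (fun l => !pyStrIsupper l)) :: pvSegsB (ls.dropWhile (fun l => !pyStrIsupper l)) := by
  rw [pvSegsB.eq_def]

-- A's chunk text of a segment: each line followed by '\n'
def pvBlob (seg : List (List Char)) : List Char := (seg.map (· ++ ['\n'])).flatten

def pvChunkOf (seg : List (List Char)) : List Char := PySem.Chars.strip (pvBlob seg)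

-- proof-side boundary indices with an explicit start offset
def pvBIdx (ls : List (List Char)) (s : Int) : List Int :=
  ((PySem.List.enumerate ls s).filter (fun p => pyStrIsupper p.2)).map (·.1)

-- proof-side unfolding of B's boundary fold
def pvGo (lines : List (List Char)) : List Int → Int → List (List (List Char))
  | [], s => [PySem.List.slice lines (some s)]
  | b :: bs, s => PySem.List.slice lines (some s) (some b) :: pvGo lines bs b

lemma pvBIdx_cons (x : List Char) (ls : List (List Char)) (s : Int) :
    pvBIdx (x :: ls) s = if pyStrIsupper x then s :: pvBIdx ls (s + 1) else pvBIdx ls (s + 1) := by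
  simp [pvBIdx, PySem.List.enumerate_cons, List.filter_cons]
  split <;> simp

lemma pvLoopA_eq (ls : List (List Char)) : ∀ (chunks : List (List Char)) (chunk : List Char),
    pvLoopA ls chunks chunk =
      chunks ++ PySem.Chars.strip (chunk ++ pvBlob (ls.takeWhile (fun l => !pyStrIsupper l))) ::
        (pvSegsB (ls.dropWhile (fun l => !pyStrIsupper l))).map pvChunkOf := by
  induction ls with
  | nil => intro chunks chunk; simp [pvLoopA, pvSegsB, pvBlob]
  | cons l ls ih =>
    intro chunks chunk
    by_cases h : pyStrIsupper l = true
    · rw [pvLoopA, if_pos h, ih, List.takeWhile_cons, List.dropWhile_cons]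
      have hb : (!pyStrIsupper l) = false := by simp [h]
      rw [hb]
      simp only [Bool.false_eq_true, if_false]
      rw [pvSegsB_cons]
      simp [pvChunkOf, pvBlob]
    · rw [pvLoopA, if_neg h, ih, List.takeWhile_cons, List.dropWhile_cons]
      have hb : (!pyStrIsupper l) = true := by simp_all
      rw [hb]
      simp only [if_true]
      simp [pvBlob]

lemma pvFold_bridge (lines : List (List Char)) (bs : List Int) :
    ∀ (acc : List (List (List Char))) (s : Int),
      (bs.foldl (fun (st : List (List (List Char)) × Int) b =>
        (st.1 ++ [PySem.List.slice lines (some st.2) (some b)], b)) (acc, s)).1 ++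
      [PySem.List.slice lines
        (some (bs.foldl (fun (st : List (List (List Char)) × Int) b =>
          (st.1 ++ [PySem.List.slice lines (some st.2) (some b)], b)) (acc, s)).2)]
      = acc ++ pvGo lines bs s := by
  induction bs with
  | nil => intro acc s; simp [pvGo]
  | cons b bs ih =>
    intro acc s
    rw [List.foldl_cons, ih, pvGo]
    simp

lemma pvGo_eq (rs : List (List Char)) : ∀ (done mid : List (List Char)),
    pvGo (done ++ mid ++ rs) (pvBIdx rs ((done.length : Int) + (mid.length : Int))) (done.length : Int) =
      (mid ++ rs.takeWhile (fun l => !pyStrIsupper l)) ::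
        pvSegsB (rs.dropWhile (fun l => !pyStrIsupper l)) := by
  induction rs with
  | nil =>
    intro done mid
    simp only [pvBIdx, PySem.List.enumerate_nil, List.filter_nil, List.map_nil, pvGo]
    rw [PySem.List.slice_from _ (by positivity)]
    simp [pvSegsB, List.drop_left']
  | cons x rs ih =>
    intro done mid
    rw [pvBIdx_cons]
    by_cases h : pyStrIsupper x = true
    · rw [if_pos h, pvGo]
      rw [PySem.List.slice_toNat _ (by positivity) (by positivity)]
      have h2 : ((done.length : Int) + (mid.length : Int)).toNat - (done.length : Int).toNat = mid.length := by omega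
      have h3 : ((done.length : Int)).toNat = done.length := Int.toNat_natCast _
      rw [h2, h3]
      have h4 : List.drop done.length (done ++ mid ++ x :: rs) = mid ++ x :: rs := by
        rw [List.append_assoc, List.drop_left]
      rw [h4]
      simp only [List.take_left]
      -- tail via ih with done := done ++ mid, mid := [x]
      have h5 : done ++ mid ++ x :: rs = (done ++ mid) ++ [x] ++ rs := by simp
      have h6 : ((done.length : Int) + (mid.length : Int)) = ((done ++ mid).length : Int) := by
        push_cast [List.length_append]; ring
      have h7 : ((done.length : Int) + (mid.length : Int)) + 1 = (((done ++ mid).length : Int)) + (([x] : List (List Char)).length : Int) := by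
        simp only [List.length_append, List.length_cons, List.length_nil]
        push_cast; ring
      rw [h5, h7]
      conv_lhs => rw [h6]
      rw [ih (done ++ mid) [x]]
      rw [List.takeWhile_cons, List.dropWhile_cons]
      have hb : (!pyStrIsupper x) = false := by simp [h]
      rw [hb]
      simp only [Bool.false_eq_true, if_false]
      rw [pvSegsB_cons]
      simp
    · rw [if_neg h]
      have h5 : done ++ mid ++ x :: rs = done ++ (mid ++ [x]) ++ rs := by simp
      have h7 : ((done.length : Int) + (mid.length : Int)) + 1 = ((done.length : Int)) + (((mid ++ [x]).length) : Int) := by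
        simp only [List.length_append, List.length_cons, List.length_nil]
        push_cast; ring
      rw [h5, h7, ih done (mid ++ [x])]
      rw [List.takeWhile_cons, List.dropWhile_cons]
      have hb : (!pyStrIsupper x) = true := by simp_all
      rw [hb]
      simp only [if_true]
      simp

lemma pvStrip_snoc_nl (ys : List Char) :
    PySem.Chars.strip (ys ++ ['\n']) = PySem.Chars.strip ys := by
  simp only [PySem.Chars.strip, PySem.Chars.lstrip, PySem.Chars.rstrip, List.dropWhile_append]
  split
  · next h =>
    simp only [List.isEmpty_iff] at h
    rw [h]
    simp [PySem.Chars.isspace]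
  · simp [List.reverse_append, PySem.Chars.isspace]

lemma pvBlob_eq (seg : List (List Char)) (h : seg ≠ []) :
    pvBlob seg = PySem.Chars.join ['\n'] seg ++ ['\n'] := by
  induction seg with
  | nil => simp at h
  | cons x xs ih =>
    cases xs with
    | nil => simp [pvBlob, PySem.Chars.join, List.intercalate]
    | cons y ys =>
      rw [PySem.Chars.join_cons_cons]
      simp only [pvBlob, List.map_cons, List.flatten_cons] at ih ⊢
      rw [ih (by simp)]
      simp

lemma pvChunkOf_eq_join (seg : List (List Char)) :
    pvChunkOf seg = PySem.Chars.strip (PySem.Chars.join ['\n'] seg) := by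
  cases seg with
  | nil => simp [pvChunkOf, pvBlob, PySem.Chars.join, List.intercalate]
  | cons x xs => rw [pvChunkOf, pvBlob_eq _ (by simp), pvStrip_snoc_nl]

-- both ports reduce to the same filter/map over the common segment list
lemma pvSegments_common (lines : List (List Char)) :
    pvGo lines (pvBIdx lines 0) 0 =
      lines.takeWhile (fun l => !pyStrIsupper l) :: pvSegsB (lines.dropWhile (fun l => !pyStrIsupper l)) := by
  have := pvGo_eq lines [] []
  simpa using this

-- ===== VERDICT (by name: the statement is the Claim_ definition above) =====
theorem split_text_by_all_caps_lines_spec : Claim_equal_split_text_by_all_caps_lines := by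
  intro text _
  unfold Spec_split_text_by_all_caps_lines split_text_by_all_caps_lines split_text_by_all_caps_lines_alt
  simp only []
  set lines := ((PySem.Str.split? text "\n").getD []).map String.toList with hlines
  congr 1
  -- B's boundary fold produces the common segment list
  rw [pvFold_bridge lines (((PySem.List.enumerate lines).filter (fun p => pyStrIsupper p.2)).map (·.1)) [] 0]
  have hB : (((PySem.List.enumerate lines).filter (fun p => pyStrIsupper p.2)).map (·.1)) = pvBIdx lines 0 := rfl
  rw [hB, pvSegments_common]
  -- A's loop produces the chunks of the same segments
  rw [pvLoopA_eq]
  rw [PySem.List.foldl_append_if (fun seg => !(PySem.Chars.strip (PySem.Chars.join ['\n'] seg)).isEmpty)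
        (fun seg => PySem.Chars.strip (PySem.Chars.join ['\n'] seg))]
  simp only [List.nil_append]
  have hA : PySem.Chars.strip (pvBlob (lines.takeWhile (fun l => !pyStrIsupper l))) ::
      (pvSegsB (lines.dropWhile (fun l => !pyStrIsupper l))).map pvChunkOf =
      (lines.takeWhile (fun l => !pyStrIsupper l) :: pvSegsB (lines.dropWhile (fun l => !pyStrIsupper l))).map pvChunkOf := by
    simp [pvChunkOf]
  rw [hA, List.filter_map]
  simp only [funext pvChunkOf_eq_join]
  rw [Function.comp_def]
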